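-- pv_equiv track=rewrite | github.com/zuned11/advent-of-code-2023 | Day3/day3pt2.py | recurse_left
-- ===== SOURCE A (Python) =====
-- def recurse_left(line: str, index: int) -> str:
--     if index - 1 >= 0:
--         if line[index - 1].isnumeric():
--             return recurse_left(line, index - 1) + str(line[index])
--         elif not line[index - 1].isnumeric():
--             if line[index].isnumeric():
--                 return line[index]
--             else:
--                 return ''
--     elif index == 0:
--         return str(line[index])
-- ===== SOURCE B (Python) =====
-- def recurse_left(line: str, index: int) -> str:
--     if index < 0:
--         return None
--     i = index
--     while i >= 1 and line[i - 1].isnumeric():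
--         i -= 1
--     base = line[0] if i == 0 else (line[i] if line[i].isnumeric() else '')
--     return base + ''.join(line[j] for j in range(i + 1, index + 1))
-- ===== Notes on version B (the rewrite author's own statement) =====
-- stated objective: simpler
-- what changed: Replaced the recursion (which rebuilds a growing string at every level) by an iterative scan that first locates the start of the digit run with a while loop and then joins the characters once.
-- outside the precondition, e.g. on recurse_left('12', -1): A returns None, B returns None
import Mathlib
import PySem

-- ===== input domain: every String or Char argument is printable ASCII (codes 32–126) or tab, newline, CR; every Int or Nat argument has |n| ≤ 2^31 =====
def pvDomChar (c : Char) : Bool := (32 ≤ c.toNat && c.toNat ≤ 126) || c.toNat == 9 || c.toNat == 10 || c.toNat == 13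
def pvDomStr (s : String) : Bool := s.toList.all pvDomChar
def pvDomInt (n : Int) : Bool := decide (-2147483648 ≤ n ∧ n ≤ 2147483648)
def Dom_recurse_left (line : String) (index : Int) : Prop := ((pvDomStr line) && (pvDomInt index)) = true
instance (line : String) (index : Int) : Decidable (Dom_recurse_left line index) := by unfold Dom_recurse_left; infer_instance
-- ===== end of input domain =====

-- B replaces A's recursion (which rebuilds a growing string at every level) by an
-- iterative scan that locates the start of the digit run and joins the characters once (objective: simpler).

-- ===== PORT A =====
-- line[n].isnumeric() — on the printable-ASCII domain isnumeric coincides with isdigit;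
-- out-of-range access (an IndexError in Python) yields false / "" here and is excluded by Pre_.
def pvDigitAt (l : List Char) (n : Nat) : Bool :=
  match PySem.List.pyGet? l (n : Int) with
  | some c => PySem.Chars.isdigit c
  | none => false

-- str(line[n]) as a one-character string ("" on the excluded IndexError inputs)
def pvCharStr (l : List Char) (n : Nat) : String :=
  match PySem.List.pyGet? l (n : Int) with
  | some c => String.mk [c]
  | none => ""

-- A's recursion, on the nonnegative index (A returns None — no String — for index < 0; excluded by Pre_)
def pvRecA (l : List Char) : Nat → String
  | 0 => pvCharStr l 0
  | n + 1 =>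
    if pvDigitAt l n then
      pvRecA l n ++ pvCharStr l (n + 1)
    else
      if pvDigitAt l (n + 1) then pvCharStr l (n + 1) else ""

def recurse_left (line : String) (index : Int) : String :=
  if 0 ≤ index then pvRecA line.toList index.toNat else ""

-- ===== PORT B =====
-- B's while loop: i = index; while i >= 1 and line[i-1].isnumeric(): i -= 1
def pvRunStart (l : List Char) : Nat → Nat
  | 0 => 0
  | n + 1 => if pvDigitAt l n then pvRunStart l n else n + 1

def recurse_left_alt (line : String) (index : Int) : String :=
  if index < 0 then ""  -- B returns None here (no String); excluded by Pre_
  else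
    let l := line.toList
    let idx := index.toNat
    let i := pvRunStart l idx
    let base := if i = 0 then pvCharStr l 0
                else if pvDigitAt l i then pvCharStr l i else ""
    base ++ String.join ((List.range' (i + 1) (idx - i)).map (fun j => pvCharStr l j))

-- ===== PRECONDITION & SPEC =====
-- Pre_ excludes index < 0 (A falls through both branches and returns None, not a str — B does the same)
-- and index ≥ len(line) (both programs raise IndexError).
def Pre_recurse_left (line : String) (index : Int) : Prop :=
  0 ≤ index ∧ index < (line.toList.length : Int)
instance (line : String) (index : Int) : Decidable (Pre_recurse_left line index) := by
  unfold Pre_recurse_left; infer_instance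

def pvWitness_recurse_left : String × Int := (".12", 2)

def Spec_recurse_left (line : String) (index : Int) (out : String) : Prop := out = recurse_left_alt line index
instance (line : String) (index : Int) (out : String) : Decidable (Spec_recurse_left line index out) := by unfold Spec_recurse_left; infer_instance

-- ===== CLAIM (what is proved, stated in full; the proofs are below) =====
def Claim_equal_recurse_left : Prop := ∀ (line : String) (index : Int), Dom_recurse_left line index → Pre_recurse_left line index → Spec_recurse_left line index (recurse_left line index)

-- ===== LEMMAS AND PROOFS =====

theorem pvRunStart_le (l : List Char) (n : Nat) : pvRunStart l n ≤ n := by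
  induction n with
  | zero => simp [pvRunStart]
  | succ k ih =>
    unfold pvRunStart
    split
    · omega
    · omega

theorem pvJoin_append (xs : List String) (s : String) :
    String.join (xs ++ [s]) = String.join xs ++ s := by
  simp [String.join, List.foldl_append]

theorem pvMain (l : List Char) (n : Nat) :
    pvRecA l n =
      (if pvRunStart l n = 0 then pvCharStr l 0
       else if pvDigitAt l (pvRunStart l n) then pvCharStr l (pvRunStart l n) else "")
      ++ String.join ((List.range' (pvRunStart l n + 1) (n - pvRunStart l n)).map (fun j => pvCharStr l j)) := by
  induction n with
  | zero =>
    simp [pvRecA, pvRunStart, String.join]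
  | succ k ih =>
    by_cases hd : pvDigitAt l k
    · have hrs : pvRunStart l (k + 1) = pvRunStart l k := by
        simp [pvRunStart, hd]
      have hle : pvRunStart l k ≤ k := pvRunStart_le l k
      have hsub : k + 1 - pvRunStart l k = (k - pvRunStart l k) + 1 := by omega
      have hrange : List.range' (pvRunStart l k + 1) ((k - pvRunStart l k) + 1)
          = List.range' (pvRunStart l k + 1) (k - pvRunStart l k) ++ [pvRunStart l k + 1 + (k - pvRunStart l k)] := by
        rw [List.range'_concat]; simp
      have hidx : pvRunStart l k + 1 + (k - pvRunStart l k) = k + 1 := by omega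
      rw [show pvRecA l (k + 1) = pvRecA l k ++ pvCharStr l (k + 1) by
            simp [pvRecA, hd]]
      rw [ih, hrs, hsub, hrange, hidx]
      simp [pvJoin_append, String.append_assoc]
    · have hrs : pvRunStart l (k + 1) = k + 1 := by
        simp [pvRunStart, hd]
      rw [show pvRecA l (k + 1) = (if pvDigitAt l (k + 1) then pvCharStr l (k + 1) else "") by
            simp [pvRecA, hd]]
      rw [hrs]
      simp [String.join]

-- ===== VERDICT (by name: the statement is the Claim_ definition above) =====
theorem recurse_left_spec : Claim_equal_recurse_left := by
  intro line index _ hpre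
  have h0 : 0 ≤ index := hpre.1
  unfold Spec_recurse_left recurse_left recurse_left_alt
  rw [if_pos h0, if_neg (by omega)]
  exact pvMain line.toList index.toNat
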